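-- pv_equiv track=rewrite | github.com/deepfounder-ai/qwe-qwe | tests/test_endpoint_consistency.py | _full_segment_match
-- ===== SOURCE A (Python) =====
-- def _full_segment_match(ui_path: str, server_path: str) -> bool:
--     """True if every server segment either equals the UI segment or is a ``{…}`` wildcard.
--
--     Handles the case where a UI literal fills a templated slot, e.g.
--     ``/api/kv/spicy_duck`` matching server template ``/api/kv/{key}``.
--     """
--     ui_segs = ui_path.split("/")
--     srv_segs = server_path.split("/")
--     if len(ui_segs) != len(srv_segs):
--         return False
--     for u, s in zip(ui_segs, srv_segs, strict=True):
--         if s.startswith("{") and s.endswith("}"):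
--             continue  # wildcard segment
--         if u != s:
--             return False
--     return True
-- ===== SOURCE B (Python) =====
-- import re
--
--
-- def _full_segment_match(ui_path: str, server_path: str) -> bool:
--     """Compile the server template into an anchored regex and match the UI path.
--
--     Each ``{…}`` segment becomes ``[^/]*`` (never crossing a slash, so the
--     segment counts must line up), every literal segment is re.escape'd.
--     """
--     pattern = "/".join(
--         "[^/]*" if seg.startswith("{") and seg.endswith("}") else re.escape(seg)
--         for seg in server_path.split("/")
--     )
--     return re.fullmatch(pattern, ui_path) is not None
-- ===== Notes on version B (the rewrite author's own statement) =====
-- stated objective: idiomatic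
-- what changed: Replaces A's segment-count check plus explicit zip loop by compiling the server template into one anchored regex ('[^/]*' per {...} wildcard segment, re.escape'd literals joined with '/') and full-matching the UI path against it.
import Mathlib
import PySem

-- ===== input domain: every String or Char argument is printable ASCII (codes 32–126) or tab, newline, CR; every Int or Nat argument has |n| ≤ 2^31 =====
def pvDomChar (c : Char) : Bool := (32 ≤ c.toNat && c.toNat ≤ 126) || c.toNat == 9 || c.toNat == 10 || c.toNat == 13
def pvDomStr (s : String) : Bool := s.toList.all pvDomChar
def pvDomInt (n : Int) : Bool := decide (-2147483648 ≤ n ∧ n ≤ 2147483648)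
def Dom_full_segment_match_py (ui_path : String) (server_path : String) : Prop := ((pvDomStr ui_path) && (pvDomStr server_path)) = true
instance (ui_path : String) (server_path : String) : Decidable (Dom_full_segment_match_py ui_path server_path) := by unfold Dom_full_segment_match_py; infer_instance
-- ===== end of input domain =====

-- B replaces A's length-check-plus-zip loop by compiling the server template
-- into an anchored regex ('[^/]*' per wildcard segment, escaped literals) and
-- full-matching the UI path against it (objective: idiomatic; not faster).

-- ===== PORT A =====
-- s.startswith("{") and s.endswith("}")
def pvWildcard (s : List Char) : Bool :=
  PySem.Chars.startswith s ['{'] && PySem.Chars.endswith s ['}']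

-- the 'for u, s in zip(...)' loop of A
def pvALoop : List (List Char × List Char) → Bool
  | [] => true
  | (u, s) :: rest =>
    if pvWildcard s then pvALoop rest
    else if u ≠ s then false
    else pvALoop rest

def full_segment_match_py (ui_path : String) (server_path : String) : Bool :=
  let ui_segs := PySem.Chars.splitOn ui_path.toList ['/']
  let srv_segs := PySem.Chars.splitOn server_path.toList ['/']
  if ui_segs.length ≠ srv_segs.length then false
  else pvALoop (ui_segs.zip srv_segs)

-- ===== PORT B =====
-- One compiled-regex piece of Source B's pattern: '[^/]*' or an escaped literal
-- (re.escape(t) matches exactly the characters of t, so the literal piece is t itself).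
inductive PvSeg
  | wild
  | lit : List Char → PvSeg
deriving DecidableEq, Repr

-- '"/".join("[^/]*" if seg.startswith("{") and seg.endswith("}") else re.escape(seg) for seg in server_path.split("/"))'
def pvCompile (srv : List Char) : List PvSeg :=
  (PySem.Chars.splitOn srv ['/']).map
    (fun s => if pvWildcard s then .wild else .lit s)

-- whether one regex piece matches a slash-free stretch: '[^/]*' matches any
-- run of non-'/' characters, an escaped literal matches exactly itself
def pvSegFits : PvSeg → List Char → Bool
  | .wild, cs => cs.all (· ≠ '/')
  | .lit t, cs => cs == t

-- re.fullmatch of the compiled pattern: the pieces are separated by literal '/'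
-- and no piece can match a '/', so the regex match is deterministic — each
-- piece consumes exactly the stretch up to the next '/'; this matcher is
-- exact for Source B's pattern language.
def pvMatch : List PvSeg → List Char → Bool
  | [], cs => cs.isEmpty
  | [seg], cs => pvSegFits seg cs
  | seg :: rest, cs =>
    pvSegFits seg (cs.takeWhile (· ≠ '/')) &&
      match cs.dropWhile (· ≠ '/') with
      | [] => false
      | _ :: tail => pvMatch rest tail

def full_segment_match_py_alt (ui_path : String) (server_path : String) : Bool :=
  pvMatch (pvCompile server_path.toList) ui_path.toList

-- ===== PRECONDITION & SPEC =====
def Spec_full_segment_match_py (ui_path : String) (server_path : String) (out : Bool) : Prop := out = full_segment_match_py_alt ui_path server_path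
instance (ui_path : String) (server_path : String) (out : Bool) : Decidable (Spec_full_segment_match_py ui_path server_path out) := by unfold Spec_full_segment_match_py; infer_instance

-- ===== CLAIM (what is proved, stated in full; the proofs are below) =====
def Claim_equal_full_segment_match_py : Prop := ∀ (ui_path : String) (server_path : String), Dom_full_segment_match_py ui_path server_path → Spec_full_segment_match_py ui_path server_path (full_segment_match_py ui_path server_path)

-- ===== LEMMAS AND PROOFS =====

-- prepend x onto the head piece (the accumulator shape of splitOn.go)
def pvConsHead (x : List Char) : List (List Char) → List (List Char)
  | [] => [x]
  | h :: t => (x ++ h) :: t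

-- structural form of split-on-'/'
def pvSplitSlash : List Char → List (List Char)
  | [] => [[]]
  | c :: t => if c = '/' then [] :: pvSplitSlash t else pvConsHead [c] (pvSplitSlash t)

theorem pvConsHead_consHead (x y : List Char) (L : List (List Char)) :
    pvConsHead x (pvConsHead y L) = pvConsHead (x ++ y) L := by
  cases L <;> simp [pvConsHead]

theorem pvConsHead_nil {L : List (List Char)} (h : L ≠ []) : pvConsHead [] L = L := by
  cases L with
  | nil => exact absurd rfl h
  | cons a t => simp [pvConsHead]

theorem pvConsHead_length {L : List (List Char)} (x : List Char) (h : L ≠ []) :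
    (pvConsHead x L).length = L.length := by
  cases L with
  | nil => exact absurd rfl h
  | cons a t => simp [pvConsHead]

theorem pvSplitSlash_ne_nil (cs : List Char) : pvSplitSlash cs ≠ [] := by
  induction cs with
  | nil => simp [pvSplitSlash]
  | cons c t ih =>
    simp only [pvSplitSlash]
    split
    · simp
    · cases h : pvSplitSlash t <;> simp [pvConsHead]

theorem pvSplitOn_go_eq (l : List Char) (fuel : Nat) (cur : List Char) (acc : List (List Char))
    (h : l.length ≤ fuel) :
    PySem.Chars.splitOn.go ['/'] fuel l cur acc
      = acc.reverse ++ pvConsHead cur.reverse (pvSplitSlash l) := by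
  induction l generalizing fuel cur acc with
  | nil =>
    cases fuel <;> simp [PySem.Chars.splitOn.go, pvSplitSlash, pvConsHead]
  | cons c rest ih =>
    cases fuel with
    | zero => simp at h
    | succ f =>
      have hf : rest.length ≤ f := by simpa using h
      by_cases hc : c = '/'
      · subst hc
        simp only [PySem.Chars.splitOn.go, List.isPrefixOf, BEq.rfl, Bool.true_and,
          if_pos, List.length_cons, List.drop_succ_cons, List.length_nil, List.drop_zero]
        rw [ih f [] (cur.reverse :: acc) hf]
        simp only [pvSplitSlash, pvConsHead, List.reverse_cons, List.append_assoc,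
          List.singleton_append]
        cases hS : pvSplitSlash rest with
        | nil => exact absurd hS (pvSplitSlash_ne_nil rest)
        | cons a b => simp
      · have hpre : List.isPrefixOf ['/'] (c :: rest) = false := by
          simp [List.isPrefixOf, Ne.symm hc]
        simp only [PySem.Chars.splitOn.go, hpre, Bool.false_eq_true, if_false]
        rw [ih f (c :: cur) acc hf]
        simp only [pvSplitSlash, if_neg hc, List.reverse_cons]
        rw [pvConsHead_consHead]
theorem pvSplitOn_eq (cs : List Char) :
    PySem.Chars.splitOn cs ['/'] = pvSplitSlash cs := by
  rw [PySem.Chars.splitOn, pvSplitOn_go_eq cs (cs.length + 1) [] [] (by omega)]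
  simp [pvConsHead_nil (pvSplitSlash_ne_nil cs)]

theorem pvSplitSlash_no_slash (cs : List Char) (h : ∀ c ∈ cs, c ≠ '/') :
    pvSplitSlash cs = [cs] := by
  induction cs with
  | nil => simp [pvSplitSlash]
  | cons c t ih =>
    simp only [pvSplitSlash]
    rw [if_neg (h c (by simp)), ih (fun x hx => h x (by simp [hx]))]
    simp [pvConsHead]

theorem pvSplitSlash_append (pre tail : List Char) (h : ∀ c ∈ pre, c ≠ '/') :
    pvSplitSlash (pre ++ '/' :: tail) = pre :: pvSplitSlash tail := by
  induction pre with
  | nil => simp [pvSplitSlash]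
  | cons c p ih =>
    simp only [List.cons_append, pvSplitSlash]
    rw [if_neg (h c (by simp)), ih (fun x hx => h x (by simp [hx]))]
    simp [pvConsHead]

theorem pvSplitSlash_mem (cs : List Char) (p : List Char) (hp : p ∈ pvSplitSlash cs) :
    ∀ c ∈ p, c ≠ '/' := by
  induction cs generalizing p with
  | nil =>
    simp [pvSplitSlash] at hp
    simp [hp]
  | cons c t ih =>
    simp only [pvSplitSlash] at hp
    by_cases hc : c = '/'
    · rw [if_pos hc] at hp
      rcases List.mem_cons.mp hp with h1 | h2
      · simp [h1]
      · exact ih p h2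
    · rw [if_neg hc] at hp
      cases hS : pvSplitSlash t with
      | nil => exact absurd hS (pvSplitSlash_ne_nil t)
      | cons h0 tl =>
        rw [hS] at hp
        simp only [pvConsHead] at hp
        rcases List.mem_cons.mp hp with h1 | h2
        · subst h1
          intro x hx
          rcases List.mem_cons.mp hx with rfl | hx'
          · exact hc
          · exact ih h0 (by simp [hS]) x hx'
        · exact ih p (by simp [hS, h2]) 

theorem pvSplitSlash_length_slash (cs : List Char) (h : '/' ∈ cs) :
    2 ≤ (pvSplitSlash cs).length := by
  induction cs with
  | nil => simp at h
  | cons c t ih =>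
    simp only [pvSplitSlash]
    by_cases hc : c = '/'
    · rw [if_pos hc]
      have := pvSplitSlash_ne_nil t
      simp only [List.length_cons]
      have : 1 ≤ (pvSplitSlash t).length := List.length_pos_of_ne_nil (pvSplitSlash_ne_nil t)
      omega
    · rw [if_neg hc, pvConsHead_length _ (pvSplitSlash_ne_nil t)]
      refine ih ?_
      rcases List.mem_cons.mp h with h1 | h2
      · exact absurd h1.symm hc
      · exact h2

theorem pvDropWhile_head_false {p : Char → Bool} {l : List Char} {d : Char} {tl : List Char}
    (h : l.dropWhile p = d :: tl) : p d = false := by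
  induction l with
  | nil => simp at h
  | cons c t ih =>
    rw [List.dropWhile_cons] at h
    by_cases hc : p c
    · simp [hc] at h
      exact ih h
    · simp [hc] at h
      rw [← h.1]
      simpa using hc

theorem pvMain (ts : List (List Char)) (cs : List Char) (hne : ts ≠ [])
    (hsl : ∀ t ∈ ts, ∀ c ∈ t, c ≠ '/') :
    pvMatch (ts.map (fun s => if pvWildcard s then .wild else .lit s)) cs
      = (decide ((pvSplitSlash cs).length = ts.length)
          && pvALoop ((pvSplitSlash cs).zip ts)) := by
  induction ts generalizing cs with
  | nil => exact absurd rfl hne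
  | cons t ts' ih =>
    cases ts' with
    | nil =>
      -- single segment
      by_cases hs : '/' ∈ cs
      · have hlen := pvSplitSlash_length_slash cs hs
        have hd : decide ((pvSplitSlash cs).length = 1) = false := by
          simp; omega
        simp only [List.map_cons, List.map_nil, pvMatch, List.length_cons, List.length_nil,
          Nat.zero_add, hd, Bool.false_and]
        by_cases hw : pvWildcard t
        · simp [hw, pvSegFits]
          exact hs
        · have : cs ≠ t := by
            intro hct
            exact hsl t (by simp) '/' (hct ▸ hs) rfl
          simp [hw, pvSegFits, this]
      · have hno : ∀ c ∈ cs, c ≠ '/' := fun c hc he => hs (he ▸ hc)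
        rw [pvSplitSlash_no_slash cs hno]
        simp only [List.map_cons, List.map_nil, pvMatch, List.zip_cons_cons, List.zip_nil_right,
          List.length_cons, List.length_nil, decide_true, Bool.true_and]
        by_cases hw : pvWildcard t
        · simp [hw, pvSegFits, pvALoop, List.all_eq_true]
          exact fun c hc => hno c hc
        · by_cases he : cs = t <;> simp [hw, pvSegFits, pvALoop, he]
    | cons t2 ts'' =>
      have hne2 : (t2 :: ts'') ≠ ([] : List (List Char)) := by simp
      by_cases hs : '/' ∈ cs
      · -- cs = pre ++ '/' :: tail
        have hdw : cs.dropWhile (· ≠ '/') ≠ [] := by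
          rw [Ne, List.dropWhile_eq_nil_iff]
          intro hall
          simpa using hall '/' hs
        obtain ⟨d, tail, hdt⟩ := List.exists_cons_of_ne_nil hdw
        have hdhead : d = '/' := by
          have := pvDropWhile_head_false hdt
          simpa using this
        subst hdhead
        have hpre : ∀ c ∈ cs.takeWhile (· ≠ '/'), c ≠ '/' := by
          intro c hc
          simpa using List.mem_takeWhile_imp hc
        have hcs : cs = cs.takeWhile (· ≠ '/') ++ '/' :: tail := by
          conv_lhs => rw [← List.takeWhile_append_dropWhile (p := fun c => decide (c ≠ '/')) (l := cs)]
          rw [hdt]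
        rw [show pvSplitSlash cs = cs.takeWhile (· ≠ '/') :: pvSplitSlash tail by
          conv_lhs => rw [hcs]
          exact pvSplitSlash_append _ _ hpre]
        simp only [List.map_cons, pvMatch, hdt]
        have ih' := ih tail hne2 (fun x hx => hsl x (by simp [hx]))
        simp only [List.map_cons] at ih'
        rw [ih']
        have htl : 1 ≤ (pvSplitSlash tail).length :=
          List.length_pos_of_ne_nil (pvSplitSlash_ne_nil tail)
        simp only [List.zip_cons_cons, pvALoop, List.length_cons]
        by_cases hw : pvWildcard t
        · have hfit : pvSegFits (if pvWildcard t then PvSeg.wild else PvSeg.lit t)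
              (cs.takeWhile (· ≠ '/')) = true := by
            simp [hw, pvSegFits]
          rw [hfit, if_pos hw]
          by_cases hq : (pvSplitSlash tail).length = ts''.length + 1 <;>
            simp [hq]
        · rw [if_neg hw]
          by_cases he : cs.takeWhile (· ≠ '/') = t <;>
            by_cases hq : (pvSplitSlash tail).length = ts''.length + 1 <;>
              simp [pvSegFits, he, hq, hw, Bool.beq_eq_decide_eq]
      · -- no slash: both sides false
        have hno : ∀ c ∈ cs, c ≠ '/' := fun c hc he => hs (he ▸ hc)
        have hdw : cs.dropWhile (· ≠ '/') = [] := by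
          rw [List.dropWhile_eq_nil_iff]
          intro x hx; simpa using hno x hx
        rw [pvSplitSlash_no_slash cs hno]
        simp only [List.map_cons, pvMatch]
        rw [hdw]
        simp

-- ===== VERDICT (by name: the statement is the Claim_ definition above) =====
theorem full_segment_match_py_spec : Claim_equal_full_segment_match_py := by
  intro ui srv _
  unfold Spec_full_segment_match_py
  unfold full_segment_match_py full_segment_match_py_alt pvCompile
  simp only [pvSplitOn_eq]
  rw [pvMain (pvSplitSlash srv.toList) ui.toList (pvSplitSlash_ne_nil _)
    (fun t ht => pvSplitSlash_mem _ t ht)]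
  by_cases hlen : (pvSplitSlash ui.toList).length = (pvSplitSlash srv.toList).length
  · simp [hlen]
  · simp [hlen]
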